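-- pv_equiv track=rewrite | github.com/pypi-data/pypi-mirror-70 | packages/takoshell/takoshell-0.2.8.tar.gz/takoshell-0.2.8/takoshell/tools.py | argvquote
-- ===== SOURCE A (Python) =====
-- def argvquote(arg, force=False):
--     """ Returns an argument quoted in such a way that that CommandLineToArgvW
--     on Windows will return the argument string unchanged.
--     This is the same thing Popen does when supplied with an list of arguments.
--     Arguments in a command line should be separated by spaces; this
--     function does not add these spaces. This implementation follows the
--     suggestions outlined here:
--     https://blogs.msdn.microsoft.com/twistylittlepassagesallalike/2011/04/23/everyone-quotes-command-line-arguments-the-wrong-way/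
--     """
--     if not force and len(arg) != 0 and not any([c in arg for c in ' \t\n\v"']):
--         return arg
--     else:
--         n_backslashes = 0
--         cmdline = '"'
--         for c in arg:
--             if c == '"':
--                 cmdline += (n_backslashes * 2 + 1) * '\\'
--             else:
--                 cmdline += n_backslashes * '\\'
--             if c != '\\':
--                 cmdline += c
--                 n_backslashes = 0
--             else:
--                 n_backslashes += 1
--         return cmdline + n_backslashes * 2 * '\\' + '"'
-- ===== SOURCE B (Python) =====
-- def _dbl_trail(p):
--     # double the run of trailing backslashes of p
--     n = len(p) - len(p.rstrip('\\'))
--     return p + n * '\\'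
--
--
-- def argvquote(arg, force=False):
--     if not force and len(arg) != 0 and not any([c in arg for c in ' \t\n\v"']):
--         return arg
--     return '"' + '\\"'.join(_dbl_trail(p) for p in arg.split('"')) + '"'
-- ===== Notes on version B (the rewrite author's own statement) =====
-- stated objective: alternative
-- what changed: Replaces the per-character state machine (pending-backslash counter plus growing accumulator) with a split-on-quote / double-trailing-backslashes / join formulation, which also fixes A's re-emission of pending backslash runs.
-- intended difference: On inputs that take the quoting branch and contain two consecutive backslashes, A's loop re-emits the pending backslash run at every backslash so runs of backslashes come out inflated (the witness, a space followed by two backslashes, yields five backslashes before the closing quote from A), while B returns the correct CommandLineToArgvW quoting (four backslashes there), as the MSDN rule cited in A's docstring intends. — e.g. on argvquote(" \\\\", false): A returns "\" \\\\\\\\\\\"", B returns "\" \\\\\\\\\""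
import Mathlib
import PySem

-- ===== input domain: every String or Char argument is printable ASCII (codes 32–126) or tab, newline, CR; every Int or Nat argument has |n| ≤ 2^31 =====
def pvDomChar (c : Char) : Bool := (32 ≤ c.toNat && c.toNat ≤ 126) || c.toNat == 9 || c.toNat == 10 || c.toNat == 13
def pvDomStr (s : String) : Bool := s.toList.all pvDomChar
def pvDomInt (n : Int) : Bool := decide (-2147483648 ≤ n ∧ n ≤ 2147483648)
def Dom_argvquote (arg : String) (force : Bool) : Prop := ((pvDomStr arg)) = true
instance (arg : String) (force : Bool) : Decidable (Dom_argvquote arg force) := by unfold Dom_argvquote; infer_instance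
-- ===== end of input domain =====

-- B replaces A's per-character backslash-counting state machine by split-on-quote /
-- double-trailing-backslashes / join, fixing A's extra backslash emission on backslash runs.

-- ===== PORT A =====
-- loop body of A's `for c in arg` (state = (n_backslashes, cmdline))
def argvquoteStep (st : Nat × List Char) (c : Char) : Nat × List Char :=
  let cmdline := if c = '"' then st.2 ++ List.replicate (st.1 * 2 + 1) '\\'
                 else st.2 ++ List.replicate st.1 '\\'
  if c ≠ '\\' then (0, cmdline ++ [c]) else (st.1 + 1, cmdline)

def argvquote (arg : String) (force : Bool) : String :=
  if !force && arg.toList.length != 0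
      && !([' ', '\t', '\n', Char.ofNat 11, '"'].any (fun c => arg.toList.contains c)) then
    arg
  else
    let st := arg.toList.foldl argvquoteStep (0, ['"'])
    String.mk (st.2 ++ List.replicate (st.1 * 2) '\\' ++ ['"'])

-- ===== PORT B =====
-- Source B's _dbl_trail: append one more backslash per trailing backslash (len - len(rstrip('\\')))
def dblTrail (p : List Char) : List Char :=
  p ++ List.replicate (p.length - (p.reverse.dropWhile (· == '\\')).length) '\\'

def argvquote_alt (arg : String) (force : Bool) : String :=
  if !force && arg.toList.length != 0
      && !([' ', '\t', '\n', Char.ofNat 11, '"'].any (fun c => arg.toList.contains c)) then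
    arg
  else
    String.mk ('"' :: List.intercalate ['\\', '"'] ((arg.toList.splitOn '"').map dblTrail) ++ ['"'])

-- ===== PRECONDITION & SPEC =====
-- On inputs that take the quoting branch and contain two consecutive backslashes, A's loop
-- re-emits the pending backslash run at every backslash (the witness, a space followed by two
-- backslashes, comes out with five backslashes before the closing quote); B returns the correct
-- CommandLineToArgvW quoting (four backslashes there), as the MSDN rule cited in A's docstring intends.
def D_argvquote (arg : String) (force : Bool) : Prop :=
  ¬ (force = false ∧ arg.toList ≠ [] ∧ ' ' ∉ arg.toList ∧ '\t' ∉ arg.toList ∧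
      '\n' ∉ arg.toList ∧ Char.ofNat 11 ∉ arg.toList ∧ '"' ∉ arg.toList) ∧
  PySem.Chars.isIn ['\\', '\\'] arg.toList = true
instance (arg : String) (force : Bool) : Decidable (D_argvquote arg force) := by
  unfold D_argvquote; infer_instance

def Spec_argvquote (arg : String) (force : Bool) (out : String) : Prop :=
  ¬ D_argvquote arg force → out = argvquote_alt arg force
instance (arg : String) (force : Bool) (out : String) : Decidable (Spec_argvquote arg force out) := by
  unfold Spec_argvquote; infer_instance

def pvDiffWitness_argvquote : String × Bool := (" \\\\", false)
def pvDiffWitnessOut_argvquote : String × String := ("\" \\\\\\\\\\\"", "\" \\\\\\\\\"")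

-- ===== CLAIM (what is proved, stated in full; the proofs are below) =====
def Claim_unchanged_argvquote : Prop :=
  ∀ (arg : String) (force : Bool), Dom_argvquote arg force →
    Spec_argvquote arg force (argvquote arg force)
def Claim_changed_argvquote : Prop :=
  Dom_argvquote (pvDiffWitness_argvquote.1) (pvDiffWitness_argvquote.2) ∧
  D_argvquote (pvDiffWitness_argvquote.1) (pvDiffWitness_argvquote.2) ∧
  argvquote (pvDiffWitness_argvquote.1) (pvDiffWitness_argvquote.2) = pvDiffWitnessOut_argvquote.1 ∧
  argvquote_alt (pvDiffWitness_argvquote.1) (pvDiffWitness_argvquote.2) = pvDiffWitnessOut_argvquote.2 ∧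
  pvDiffWitnessOut_argvquote.1 ≠ pvDiffWitnessOut_argvquote.2
def Claim_exact_argvquote : Prop :=
  ∀ (arg : String) (force : Bool), Dom_argvquote arg force →
    D_argvquote arg force → argvquote arg force ≠ argvquote_alt arg force

-- ===== LEMMAS AND PROOFS =====

-- A's loop with pending count n and the final `+ n*2*'\\' + '"'` folded in
def loopA : List Char → Nat → List Char
  | [], n => List.replicate (n * 2) '\\' ++ ['"']
  | c :: t, n =>
      (if c = '"' then List.replicate (n * 2 + 1) '\\' else List.replicate n '\\') ++
      (if c ≠ '\\' then c :: loopA t 0 else loopA t (n + 1))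

lemma foldA (l : List Char) : ∀ (n : Nat) (acc : List Char),
    (l.foldl argvquoteStep (n, acc)).2 ++
      List.replicate ((l.foldl argvquoteStep (n, acc)).1 * 2) '\\' ++ ['"']
    = acc ++ loopA l n := by
  induction l with
  | nil => intro n acc; simp [loopA]
  | cons c t ih =>
    intro n acc
    by_cases hq : c = '"'
    · subst hq
      have hstep : argvquoteStep (n, acc) '"'
          = (0, acc ++ List.replicate (n * 2 + 1) '\\' ++ ['"']) := by
        simp [argvquoteStep]
      rw [List.foldl_cons, hstep, ih]
      simp [loopA]
    · by_cases hb : c = '\\'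
      · subst hb
        have hstep : argvquoteStep (n, acc) '\\'
            = (n + 1, acc ++ List.replicate n '\\') := by
          simp [argvquoteStep]
        rw [List.foldl_cons, hstep, ih]
        simp [loopA]
      · have hstep : argvquoteStep (n, acc) c = (0, acc ++ List.replicate n '\\' ++ [c]) := by
          simp [argvquoteStep, hq, hb]
        rw [List.foldl_cons, hstep, ih]
        simp [loopA, hq, hb]

-- B's inner join
def Binner (l : List Char) : List Char :=
  List.intercalate ['\\', '"'] ((l.splitOn '"').map dblTrail)

def tcount (p : List Char) : Nat := (p.reverse.takeWhile (· == '\\')).length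

lemma dblTrail_eq (p : List Char) : dblTrail p = p ++ List.replicate (tcount p) '\\' := by
  unfold dblTrail tcount
  congr 1
  have h := congrArg List.length
    (List.takeWhile_append_dropWhile (p := (· == '\\')) (l := p.reverse))
  simp only [List.length_append, List.length_reverse] at h
  congr 1
  omega

lemma tw_snoc {c : Char} (h : (c == '\\') = false) (xs : List Char) :
    (xs ++ [c]).takeWhile (· == '\\') = xs.takeWhile (· == '\\') := by
  induction xs with
  | nil => simp [List.takeWhile, h]
  | cons x xs ih =>
    by_cases hx : (x == '\\') = true
    · simp [hx, ih]
    · simp [hx]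

lemma tw_append_of_ne {xs : List Char} (h : xs.takeWhile (· == '\\') ≠ xs) (ys : List Char) :
    (xs ++ ys).takeWhile (· == '\\') = xs.takeWhile (· == '\\') := by
  induction xs with
  | nil => simp at h
  | cons x xs ih =>
    by_cases hx : (x == '\\') = true
    · have : xs.takeWhile (· == '\\') ≠ xs := by
        intro he; exact h (by simp [hx, he])
      simp [hx, ih this]
    · simp [hx]

lemma tcount_cons {c : Char} (h : c ≠ '\\') (p : List Char) : tcount (c :: p) = tcount p := by
  unfold tcount
  rw [List.reverse_cons, tw_snoc (by simpa using h)]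

lemma tcount_bs_cons {c : Char} (h : c ≠ '\\') (p : List Char) :
    tcount ('\\' :: c :: p) = tcount (c :: p) := by
  unfold tcount
  rw [List.reverse_cons (a := '\\')]
  rw [tw_append_of_ne]
  intro he
  have hlen : ((c :: p).reverse.takeWhile (· == '\\')).length = (c :: p).reverse.length := by
    rw [he]
  rw [List.reverse_cons, tw_snoc (by simpa using h)] at hlen
  have h2 := congrArg List.length
    (List.takeWhile_append_dropWhile (p := (· == '\\')) (l := p.reverse))
  simp only [List.length_append, List.length_reverse] at h2
  simp at hlen
  omega

lemma sp_ne (t : List Char) : t.splitOn '"' ≠ [] := List.splitOnP_ne_nil _ t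

lemma sp_quote (t : List Char) : ('"' :: t).splitOn '"' = [] :: t.splitOn '"' := by
  simp [List.splitOn, List.splitOnP_cons]

lemma sp_other {c : Char} (h : c ≠ '"') (t : List Char) :
    (c :: t).splitOn '"' = (t.splitOn '"').modifyHead (c :: ·) := by
  simp [List.splitOn, List.splitOnP_cons, h]

lemma ic_cons (sep x : List Char) {xs : List (List Char)} (h : xs ≠ []) :
    List.intercalate sep (x :: xs) = x ++ sep ++ List.intercalate sep xs := by
  cases xs with
  | nil => exact absurd rfl h
  | cons y ys => simp [List.intercalate, List.intersperse]

lemma ic_cons_head (sep : List Char) (a : Char) (x : List Char) (xs : List (List Char)) :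
    List.intercalate sep ((a :: x) :: xs) = a :: List.intercalate sep (x :: xs) := by
  cases xs with
  | nil => simp [List.intercalate]
  | cons y ys => simp [List.intercalate, List.intersperse]

lemma binner_quote (t : List Char) : Binner ('"' :: t) = '\\' :: '"' :: Binner t := by
  unfold Binner
  rw [sp_quote, List.map_cons, ic_cons _ _ (by simp [sp_ne])]
  simp [dblTrail_eq, tcount]

lemma binner_bs_quote (t : List Char) :
    Binner ('\\' :: '"' :: t) = '\\' :: '\\' :: '\\' :: '"' :: Binner t := by
  unfold Binner
  rw [sp_other (by decide), sp_quote, List.modifyHead_cons, List.map_cons,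
      ic_cons _ _ (by simp [sp_ne])]
  simp [dblTrail_eq, tcount]

lemma binner_other {c : Char} (hq : c ≠ '"') (hb : c ≠ '\\') (t : List Char) :
    Binner (c :: t) = c :: Binner t := by
  unfold Binner
  rw [sp_other hq]
  obtain ⟨p, ps, hp⟩ : ∃ p ps, t.splitOn '"' = p :: ps := by
    cases h : t.splitOn '"' with
    | nil => exact absurd h (sp_ne t)
    | cons p ps => exact ⟨p, ps, rfl⟩
  rw [hp, List.modifyHead_cons, List.map_cons, List.map_cons]
  rw [dblTrail_eq, dblTrail_eq, tcount_cons hb]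
  exact ic_cons_head _ _ _ _

lemma binner_bs_other {c : Char} (hq : c ≠ '"') (hb : c ≠ '\\') (t : List Char) :
    Binner ('\\' :: c :: t) = '\\' :: Binner (c :: t) := by
  unfold Binner
  rw [sp_other (show ('\\' : Char) ≠ '"' by decide), sp_other hq]
  obtain ⟨p, ps, hp⟩ : ∃ p ps, t.splitOn '"' = p :: ps := by
    cases h : t.splitOn '"' with
    | nil => exact absurd h (sp_ne t)
    | cons p ps => exact ⟨p, ps, rfl⟩
  rw [hp, List.modifyHead_cons, List.modifyHead_cons, List.map_cons, List.map_cons]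
  rw [dblTrail_eq, dblTrail_eq, tcount_bs_cons hb]
  exact ic_cons_head _ _ _ _

-- the central correspondence: on inputs with no two consecutive backslashes, A's state
-- machine (with pending count 0 or 1) computes B's split/join result
lemma main_lemma (l : List Char)
    (hch : List.IsChain (fun a b => ¬(a = '\\' ∧ b = '\\')) l) :
    loopA l 0 = Binner l ++ ['"'] ∧
    (l.head? ≠ some '\\' → loopA l 1 = Binner ('\\' :: l) ++ ['"']) := by
  induction l with
  | nil => exact ⟨by decide, fun _ => by decide⟩
  | cons c t ih =>
    have hch' : List.IsChain (fun a b => ¬(a = '\\' ∧ b = '\\')) t := hch.tail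
    obtain ⟨ih0, ih1⟩ := ih hch'
    constructor
    · by_cases hq : c = '"'
      · subst hq
        simp only [loopA, if_pos (by decide : ('"' : Char) ≠ '\\')]
        rw [ih0, binner_quote]; rfl
      · by_cases hb : c = '\\'
        · subst hb
          simp only [loopA, if_neg (by decide : ¬('\\' : Char) = '"'),
            if_neg (by simp : ¬('\\' : Char) ≠ '\\')]
          have hh : t.head? ≠ some '\\' := by
            cases t with
            | nil => simp
            | cons d t' =>
              rw [List.isChain_cons_cons] at hch
              simp only [List.head?_cons, ne_eq, Option.some.injEq]
              intro hd; exact hch.1 ⟨rfl, hd⟩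
          rw [ih1 hh]; simp
        · simp only [loopA, if_neg hq, if_pos hb]
          rw [ih0, binner_other hq hb]; simp
    · intro hh
      have hc : c ≠ '\\' := by
        simp only [List.head?_cons, ne_eq, Option.some.injEq] at hh; exact hh
      by_cases hq : c = '"'
      · subst hq
        simp only [loopA, if_pos (by decide : ('"' : Char) ≠ '\\')]
        rw [ih0, binner_bs_quote]; rfl
      · simp only [loopA, if_neg hq, if_pos hc]
        rw [ih0, binner_bs_other hq hc, binner_other hq hc]; simp

lemma no_infix_chain (l : List Char) (h : ¬ (['\\', '\\'] <:+: l)) :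
    List.IsChain (fun a b => ¬(a = '\\' ∧ b = '\\')) l := by
  induction l with
  | nil => exact List.IsChain.nil
  | cons c t ih =>
    have ht : ¬ (['\\', '\\'] <:+: t) := by
      rintro ⟨s, u, hsu⟩
      exact h ⟨c :: s, u, by simp [← hsu]⟩
    cases t with
    | nil => simp
    | cons d t' =>
      refine List.isChain_cons_cons.mpr ⟨?_, ih ht⟩
      rintro ⟨rfl, rfl⟩
      exact h ⟨[], t', by simp⟩

-- the early-return guard, Bool vs Prop
lemma guard_prop (arg : String) (force : Bool) :
    ((!force && arg.toList.length != 0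
        && !([' ', '\t', '\n', Char.ofNat 11, '"'].any (fun c => arg.toList.contains c))) = true)
    ↔ (force = false ∧ arg.toList ≠ [] ∧ ' ' ∉ arg.toList ∧ '\t' ∉ arg.toList ∧
        '\n' ∉ arg.toList ∧ Char.ofNat 11 ∉ arg.toList ∧ '"' ∉ arg.toList) := by
  simp only [Bool.and_eq_true, Bool.not_eq_eq_eq_not, Bool.not_true,
    List.any_eq_false, bne_iff_ne, ne_eq, List.mem_cons, List.not_mem_nil]
  constructor
  · rintro ⟨⟨h1, h2⟩, h3⟩
    refine ⟨by simpa using h1, by simpa using h2, ?_, ?_, ?_, ?_, ?_⟩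
    · simpa using h3 ' ' (by simp)
    · simpa using h3 '\t' (by simp)
    · simpa using h3 '\n' (by simp)
    · simpa using h3 (Char.ofNat 11) (by simp)
    · simpa using h3 '"' (by simp)
  · rintro ⟨h1, h2, h3, h4, h5, h6, h7⟩
    refine ⟨⟨by simp [h1], by simpa using h2⟩, ?_⟩
    intro c hc
    rcases hc with rfl | rfl | rfl | rfl | rfl | h
    · simpa using h3
    · simpa using h4
    · simpa using h5
    · simpa using h6
    · simpa using h7
    · simp at h

-- the correct state machine (what B computes): backslashes are only counted, never re-emitted
def loopC : List Char → Nat → List Char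
  | [], n => List.replicate (n * 2) '\\' ++ ['"']
  | c :: t, n =>
      if c = '"' then List.replicate (n * 2 + 1) '\\' ++ '"' :: loopC t 0
      else if c = '\\' then loopC t (n + 1)
      else List.replicate n '\\' ++ c :: loopC t 0

-- the surplus backslashes A's loop emits beyond loopC
def Ebad : List Char → Nat → Nat
  | [], _ => 0
  | c :: t, n => if c = '\\' then n + Ebad t (n + 1) else Ebad t 0

lemma tcount_append {c : Char} (h : c ≠ '\\') (xs p : List Char) :
    tcount (xs ++ c :: p) = tcount (c :: p) := by
  unfold tcount
  rw [List.reverse_append, List.reverse_cons]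
  have hne : ((p.reverse ++ [c]).takeWhile (· == '\\')) ≠ p.reverse ++ [c] := by
    intro he
    have hlen := congrArg List.length he
    rw [tw_snoc (by simpa using h)] at hlen
    have h2 := congrArg List.length
      (List.takeWhile_append_dropWhile (p := (· == '\\')) (l := p.reverse))
    simp only [List.length_append, List.length_reverse, List.length_cons,
      List.length_nil] at h2 hlen
    omega
  rw [tw_append_of_ne hne]

lemma tcount_nil : tcount [] = 0 := rfl

lemma tcount_repl (n : Nat) : tcount (List.replicate n '\\') = n := by
  unfold tcount
  simp

lemma sp_repl (n : Nat) (t : List Char) :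
    (List.replicate n '\\' ++ t).splitOn '"'
      = (t.splitOn '"').modifyHead (List.replicate n '\\' ++ ·) := by
  induction n with
  | zero => cases h : List.splitOn '"' t <;> simp [h, List.modifyHead]
  | succ m ih =>
    rw [List.replicate_succ, List.cons_append, sp_other (by decide), ih,
      List.modifyHead_modifyHead]
    rfl

lemma ic_append_head (sep xs x : List Char) (ps : List (List Char)) :
    List.intercalate sep ((xs ++ x) :: ps) = xs ++ List.intercalate sep (x :: ps) := by
  cases ps with
  | nil => simp [List.intercalate]
  | cons y ys => simp [List.intercalate, List.intersperse]

lemma binner_repl (n : Nat) :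
    Binner (List.replicate n '\\') = List.replicate (2 * n) '\\' := by
  unfold Binner
  rw [show (List.replicate n '\\' : List Char) = List.replicate n '\\' ++ [] by simp,
    sp_repl]
  simp [dblTrail_eq, tcount_repl, -List.replicate_add, List.intercalate, two_mul]

lemma binner_repl_quote (n : Nat) (t : List Char) :
    Binner (List.replicate n '\\' ++ '"' :: t)
      = List.replicate (2 * n) '\\' ++ Binner ('"' :: t) := by
  unfold Binner
  rw [sp_repl, sp_quote, List.modifyHead_cons, List.map_cons, List.map_cons,
    ic_cons _ _ (by simp [sp_ne])]
  rw [ic_cons _ _ (by simp [sp_ne])]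
  simp [dblTrail_eq, tcount_repl, tcount_nil, -List.replicate_add, two_mul, List.append_assoc]

lemma binner_repl_other {c : Char} (hq : c ≠ '"') (hb : c ≠ '\\') (n : Nat) (t : List Char) :
    Binner (List.replicate n '\\' ++ c :: t)
      = List.replicate n '\\' ++ Binner (c :: t) := by
  unfold Binner
  rw [sp_repl, sp_other hq]
  obtain ⟨p, ps, hp⟩ : ∃ p ps, t.splitOn '"' = p :: ps := by
    cases h : t.splitOn '"' with
    | nil => exact absurd h (sp_ne t)
    | cons p ps => exact ⟨p, ps, rfl⟩
  rw [hp, List.modifyHead_cons, List.modifyHead_cons, List.map_cons, List.map_cons]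
  rw [dblTrail_eq, dblTrail_eq, tcount_append hb]
  rw [show (List.replicate n '\\' ++ c :: p) ++ List.replicate (tcount (c :: p)) '\\'
      = List.replicate n '\\' ++ ((c :: p) ++ List.replicate (tcount (c :: p)) '\\') by
    simp [List.append_assoc]]
  exact ic_append_head _ _ _ _

-- B's split/join equals the correct state machine, on ALL inputs
lemma binner_loopC : ∀ (l : List Char) (n : Nat),
    Binner (List.replicate n '\\' ++ l) ++ ['"'] = loopC l n := by
  intro l
  induction l with
  | nil =>
    intro n
    simp only [List.append_nil, loopC, binner_repl]
    rw [Nat.mul_comm]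
  | cons c t ih =>
    intro n
    by_cases hq : c = '"'
    · subst hq
      have h0 := ih 0
      simp only [List.replicate_zero, List.nil_append] at h0
      have hC : loopC ('"' :: t) n = List.replicate (n * 2 + 1) '\\' ++ '"' :: loopC t 0 := by
        simp [loopC]
      rw [hC, binner_repl_quote, binner_quote,
        show n * 2 + 1 = (n + n) + 1 by omega, List.replicate_succ', two_mul]
      simp only [List.append_assoc, List.cons_append, List.nil_append, List.append_cancel_left_eq]
      rw [h0]
    · by_cases hb : c = '\\'
      · subst hb
        rw [show List.replicate n '\\' ++ '\\' :: t = List.replicate (n + 1) '\\' ++ t by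
          simp [List.replicate_succ', List.append_assoc], ih (n + 1)]
        simp [loopC]
      · have h0 := ih 0
        simp only [List.replicate_zero, List.nil_append] at h0
        simp only [loopC, if_neg hq, if_neg hb, binner_repl_other hq hb, binner_other hq hb]
        rw [← h0]
        simp [List.append_assoc]

lemma loopA_length : ∀ (l : List Char) (n : Nat),
    (loopA l n).length = (loopC l n).length + Ebad l n := by
  intro l
  induction l with
  | nil => intro n; simp [loopA, loopC, Ebad]
  | cons c t ih =>
    intro n
    by_cases hq : c = '"'
    · subst hq
      simp [loopA, loopC, Ebad, ih 0]
      omega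
    · by_cases hb : c = '\\'
      · subst hb
        simp [loopA, loopC, Ebad, ih (n + 1)]
        omega
      · simp [loopA, loopC, Ebad, hq, hb, ih 0]
        omega

lemma Ebad_pos : ∀ (l : List Char) (n : Nat), ['\\', '\\'] <:+: l → 1 ≤ Ebad l n := by
  intro l
  induction l with
  | nil => intro n h; simp at h
  | cons c t ih =>
    intro n h
    rcases List.infix_cons_iff.mp h with hp | hi
    · obtain ⟨u, hu⟩ := hp
      simp only [List.cons_append, List.nil_append] at hu
      injection hu with h1 h2
      subst h1
      subst h2
      simp [Ebad]
      omega
    · cases t with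
      | nil => simp at hi
      | cons d t' =>
        have h1 := ih (if c = '\\' then n + 1 else 0) hi
        unfold Ebad
        split_ifs with hc
        · have := ih (n + 1) hi; omega
        · exact ih 0 hi

-- ===== VERDICT (by name: the statement is the Claim_ definition above) =====
theorem argvquote_spec : Claim_unchanged_argvquote := by
  intro arg force _ hD
  unfold argvquote argvquote_alt
  by_cases hg : (!force && arg.toList.length != 0
      && !([' ', '\t', '\n', Char.ofNat 11, '"'].any (fun c => arg.toList.contains c))) = true
  · rw [if_pos hg, if_pos hg]
  · rw [if_neg hg, if_neg hg]
    have hguard := fun hp => hg ((guard_prop arg force).mpr hp)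
    have hni : ¬ (['\\', '\\'] <:+: arg.toList) := fun hi =>
      hD ⟨hguard, (PySem.Chars.isIn_iff_infix _ _).mpr hi⟩
    have hm := (main_lemma arg.toList (no_infix_chain _ hni)).1
    have hf := foldA arg.toList 0 ['"']
    simp only []
    rw [hf, hm]
    simp [Binner]

theorem argvquote_changed : Claim_changed_argvquote := by
  unfold Claim_changed_argvquote
  refine ⟨by decide, by decide, by decide, by decide, by decide⟩

theorem argvquote_tight : Claim_exact_argvquote := by
  intro arg force _ hD heq
  obtain ⟨hgP, hinf⟩ := hD
  have hg : ¬ ((!force && arg.toList.length != 0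
      && !([' ', '\t', '\n', Char.ofNat 11, '"'].any (fun c => arg.toList.contains c))) = true) :=
    fun h => hgP ((guard_prop arg force).mp h)
  have hBC := binner_loopC arg.toList 0
  simp only [List.replicate_zero, List.nil_append] at hBC
  have hA : argvquote arg force = String.mk (['"'] ++ loopA arg.toList 0) := by
    unfold argvquote
    rw [if_neg hg]
    exact congrArg String.mk (foldA arg.toList 0 ['"'])
  have hB : argvquote_alt arg force = String.mk (['"'] ++ loopC arg.toList 0) := by
    unfold argvquote_alt
    rw [if_neg hg, ← hBC]
    simp [Binner]
  rw [hA, hB] at heq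
  have hlist := String.ofList_inj.mp heq
  have hAC : loopA arg.toList 0 = loopC arg.toList 0 :=
    List.append_cancel_left hlist
  have hlen := congrArg List.length hAC
  have hE := Ebad_pos arg.toList 0 ((PySem.Chars.isIn_iff_infix _ _).mp hinf)
  rw [loopA_length] at hlen
  omega
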